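-- pv_equiv track=rewrite | github.com/jairmj/Knight-Tour | Proyecto 4 extra.py | coordenadas
-- ===== SOURCE A (Python) =====
-- def coordenadas(pos):
--     '''
--     Retorna las coordenadas del tablero para una posición del mismo
--     '''
--     sumador=0
--     while True:
--         if (pos + sumador) % 8 == 0:   # Como sé que para cualquier posición que tenga como coordenada x = 8 va a ser múltiplo de 8, voy sumando 1 a la posición hasta que
--             x = 8-sumador              # se vuelva múltiplo de 8. Cuando esto se cumpla solo tengo que restar_ 1: La cantidad de veces que he sumado 1 a la posición y 2: El 8
--             break                      # con eso tengo la coordenada en x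
--         sumador += 1
--     if pos-x>0:
--         y = (pos-x)//8+1
--     else:
--         y=1
--     return [x,y]
-- ===== SOURCE B (Python) =====
-- def coordenadas(pos):
--     '''
--     Retorna las coordenadas del tablero para una posición del mismo
--     '''
--     x = (pos - 1) % 8 + 1
--     y = (pos - x) // 8 + 1 if pos - x > 0 else 1
--     return [x, y]
-- ===== Notes on version B (the rewrite author's own statement) =====
-- stated objective: simpler
-- what changed: Replaced the while-True search loop for the column with the closed form x = (pos-1) % 8 + 1; the y branch is kept as-is.
import Mathlib
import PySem

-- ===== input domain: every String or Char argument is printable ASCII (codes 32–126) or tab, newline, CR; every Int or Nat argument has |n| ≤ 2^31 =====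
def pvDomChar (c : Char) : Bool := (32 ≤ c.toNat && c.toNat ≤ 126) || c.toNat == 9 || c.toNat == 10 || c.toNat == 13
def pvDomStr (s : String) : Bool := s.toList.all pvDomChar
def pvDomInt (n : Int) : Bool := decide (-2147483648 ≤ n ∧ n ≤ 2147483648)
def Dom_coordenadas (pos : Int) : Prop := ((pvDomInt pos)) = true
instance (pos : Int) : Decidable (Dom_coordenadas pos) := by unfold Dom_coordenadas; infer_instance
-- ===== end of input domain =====

-- B replaces A's while-True column search with the closed form (pos-1) % 8 + 1 (simpler; same O(1) cost).

-- ===== PORT A =====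
-- A's 'while True' loop: increments sumador until (pos+sumador) % 8 == 0, then returns 8-sumador.
-- The condition fires for some sumador in 0..7, so a fuel of 8 makes the same computation total
-- (the fuel-exhausted value 0 is never reached).
def coordLoopA (pos : Int) : Nat → Int → Int
  | 0, _ => 0
  | n+1, sumador =>
      if PySem.Int.mod (pos + sumador) 8 == 0 then 8 - sumador
      else coordLoopA pos n (sumador + 1)

def coordenadas (pos : Int) : List Int :=
  let x := coordLoopA pos 8 0
  let y := if pos - x > 0 then PySem.Int.floordiv (pos - x) 8 + 1 else 1
  [x, y]

-- ===== PORT B =====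
def coordenadas_alt (pos : Int) : List Int :=
  let x := PySem.Int.mod (pos - 1) 8 + 1
  let y := if pos - x > 0 then PySem.Int.floordiv (pos - x) 8 + 1 else 1
  [x, y]

-- ===== PRECONDITION & SPEC =====
def Spec_coordenadas (pos : Int) (out : List Int) : Prop := out = coordenadas_alt pos
instance (pos : Int) (out : List Int) : Decidable (Spec_coordenadas pos out) := by unfold Spec_coordenadas; infer_instance

-- ===== CLAIM (what is proved, stated in full; the proofs are below) =====
def Claim_equal_coordenadas : Prop := ∀ (pos : Int), Dom_coordenadas pos → Spec_coordenadas pos (coordenadas pos)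

-- ===== LEMMAS AND PROOFS =====

-- A's loop computes the closed form.
theorem coordLoopA_eq (pos : Int) : coordLoopA pos 8 0 = PySem.Int.mod (pos - 1) 8 + 1 := by
  have h8 : (0:Int) < 8 := by norm_num
  simp only [coordLoopA, PySem.Int.mod_eq_emod_of_pos h8, beq_iff_eq]
  have h0 : (0:Int) ≤ pos % 8 := Int.emod_nonneg _ (by norm_num)
  have h1 : pos % 8 < 8 := Int.emod_lt_of_pos _ (by norm_num)
  split_ifs <;> omega

-- ===== VERDICT (by name: the statement is the Claim_ definition above) =====
theorem coordenadas_spec : Claim_equal_coordenadas := by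
  intro pos _
  unfold Spec_coordenadas coordenadas coordenadas_alt
  rw [coordLoopA_eq]
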